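-- pv_equiv track=rewrite | github.com/jeffbrianho/python_110 | small_problems/medium2/medium2_3rd_try/question3.py | sort_by_consonant_count
-- ===== SOURCE A (Python) =====
-- def sort_by_consonant_count(lst):
--
--     def count_adj_consonant(word):
--         count = 0
--         count_storage = []
--         indx = 0
--         VOWELS = 'aeiouAEIOU'
--
--         if ' ' in word:
--             word = ''.join(word.split())
--
--         while indx < len(word) - 1: #dddaa
--             if word[indx] not in VOWELS and word[indx + 1] not in VOWELS:
--                 count += 1
--                 indx += 1
--             elif count != 0:
--                 count_storage.append(count)
--                 count = 0
--                 indx += 1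
--             else:
--                 indx += 1
--         count_storage.append(count)
--
--         return max(count_storage)
--
--     return (sorted(lst, key=count_adj_consonant, reverse=True))
-- ===== SOURCE B (Python) =====
-- def sort_by_consonant_count(lst):
--     VOWELS = 'aeiouAEIOU'
--
--     def longest_run_key(word):
--         # same conditional whitespace-stripping quirk as the original
--         if ' ' in word:
--             word = ''.join(word.split())
--         best = 0
--         cur = 0
--         for ch in word:
--             cur = 0 if ch in VOWELS else cur + 1
--             best = max(best, cur)
--         return max(0, best - 1)
--
--     return sorted(lst, key=longest_run_key, reverse=True)
-- ===== Notes on version B (the rewrite author's own statement) =====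
-- stated objective: simpler
-- what changed: Replaces the index-pair while-loop that accumulates pair-counts into a storage list and takes its max by a single running-max fold over the characters tracking the current consonant-run length, with key = max(0, longest_run - 1).
import Mathlib
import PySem

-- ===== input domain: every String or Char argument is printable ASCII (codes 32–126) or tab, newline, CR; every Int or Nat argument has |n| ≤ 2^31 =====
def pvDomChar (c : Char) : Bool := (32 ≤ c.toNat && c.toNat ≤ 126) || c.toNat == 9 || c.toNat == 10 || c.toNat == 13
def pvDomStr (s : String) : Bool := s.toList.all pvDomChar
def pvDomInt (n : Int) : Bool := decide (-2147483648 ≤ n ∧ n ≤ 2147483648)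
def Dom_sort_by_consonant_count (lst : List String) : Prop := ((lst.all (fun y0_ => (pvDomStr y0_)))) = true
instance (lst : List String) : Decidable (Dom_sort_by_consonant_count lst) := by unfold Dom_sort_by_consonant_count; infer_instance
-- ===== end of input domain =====

-- B replaces A's index-pair while-loop (which pushes pair-counts into a storage list and
-- takes its max at the end) by a single running-max fold over the characters; objective: simpler.

-- ===== PORT A =====

-- VOWELS = 'aeiouAEIOU' (single-character membership test, ported as Char-list membership)
def pvVowels : List Char := ['a','e','i','o','u','A','E','I','O','U']

-- if ' ' in word: word = ''.join(word.split())
def pvAStrip (word : List Char) : List Char :=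
  if PySem.Chars.isIn [' '] word then PySem.Chars.join [] (PySem.Chars.split₀ word) else word

-- the while-loop of count_adj_consonant: state (count, count_storage), loop variable indx;
-- fuel = len(w) bounds the number of iterations (indx grows by 1 towards len(w) - 1, so the
-- fuel is never exhausted while the loop guard holds)
def pvALoop (w : List Char) : Nat → Int → List Int → Int → Int × List Int
  | fuel + 1, count, st, indx =>
    if indx < (w.length : Int) - 1 then
      match PySem.List.pyGet? w indx, PySem.List.pyGet? w (indx + 1) with
      | some c1, some c2 =>
        if c1 ∉ pvVowels ∧ c2 ∉ pvVowels then pvALoop w fuel (count + 1) st (indx + 1)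
        else if count ≠ 0 then pvALoop w fuel 0 (st ++ [count]) (indx + 1)
        else pvALoop w fuel count st (indx + 1)
      | _, _ => (count, st)   -- unreachable: 0 ≤ indx < len(w) - 1 keeps both indices in range
    else (count, st)
  | 0, count, st, _ => (count, st)

-- count_adj_consonant(word)
def pvAKey (word : String) : Int :=
  let w := pvAStrip word.toList
  let r := pvALoop w w.length 0 [] 0
  -- count_storage.append(count); return max(count_storage) — the list is nonempty, so max never raises
  match PySem.List.max? (r.2 ++ [r.1]) (fun x => x) with
  | some m => m
  | none => 0

def sort_by_consonant_count (lst : List String) : List String :=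
  PySem.List.sorted lst pvAKey true

-- ===== PORT B =====

-- if ' ' in word: word = ''.join(word.split())
def pvBStrip (word : List Char) : List Char :=
  if PySem.Chars.isIn [' '] word then PySem.Chars.join [] (PySem.Chars.split₀ word) else word

-- loop body: cur = 0 if ch in VOWELS else cur + 1; best = max(best, cur)
def pvBStep (s : Int × Int) (ch : Char) : Int × Int :=
  let cur : Int := if ch ∈ pvVowels then 0 else s.1 + 1
  (cur, max s.2 cur)

-- longest_run_key(word) = max(0, best - 1)
def pvBKey (word : String) : Int :=
  let w := pvBStrip word.toList
  let s := w.foldl pvBStep (0, 0)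
  max 0 (s.2 - 1)

def sort_by_consonant_count_alt (lst : List String) : List String :=
  PySem.List.sorted lst pvBKey true

-- ===== PRECONDITION & SPEC =====
def Spec_sort_by_consonant_count (lst : List String) (out : List String) : Prop := out = sort_by_consonant_count_alt lst
instance (lst : List String) (out : List String) : Decidable (Spec_sort_by_consonant_count lst out) := by unfold Spec_sort_by_consonant_count; infer_instance

-- ===== CLAIM (what is proved, stated in full; the proofs are below) =====
def Claim_equal_sort_by_consonant_count : Prop := ∀ (lst : List String), Dom_sort_by_consonant_count lst → Spec_sort_by_consonant_count lst (sort_by_consonant_count lst)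

-- ===== LEMMAS AND PROOFS =====

-- A's loop, restated structurally on the suffix of the word it still has to scan
def pvLoopS : List Char → Int → List Int → Int × List Int
  | c1 :: c2 :: rest, count, st =>
    if c1 ∉ pvVowels ∧ c2 ∉ pvVowels then pvLoopS (c2 :: rest) (count + 1) st
    else if count ≠ 0 then pvLoopS (c2 :: rest) 0 (st ++ [count])
    else pvLoopS (c2 :: rest) count st
  | _, count, st => (count, st)

-- the value A extracts from a final loop state
def pvARes (r : Int × List Int) : Int :=
  match PySem.List.max? (r.2 ++ [r.1]) (fun x => x) with
  | some m => m
  | none => 0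

lemma pvALoop_eq_loopS (t : List Char) : ∀ (w : List Char) (fuel : Nat) (indx count : Int)
    (st : List Int), 0 ≤ indx → w.drop indx.toNat = t → t.length ≤ fuel →
    pvALoop w fuel count st indx = pvLoopS t count st := by
  induction t with
  | nil =>
    intro w fuel indx count st h0 hd _hf
    have hlen : w.length ≤ indx.toNat := List.drop_eq_nil_iff.mp hd
    cases fuel with
    | zero => simp [pvALoop, pvLoopS]
    | succ f =>
      rw [pvALoop, if_neg (by omega)]
      simp [pvLoopS]
  | cons c1 t ih =>
    intro w fuel indx count st h0 hd hf
    have hlen := congrArg List.length hd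
    simp only [List.length_drop, List.length_cons] at hlen
    cases t with
    | nil =>
      simp only [List.length_nil] at hlen
      cases fuel with
      | zero => simp at hf
      | succ f =>
        rw [pvALoop, if_neg (by omega)]
        simp [pvLoopS]
    | cons c2 rest =>
      have hlt : indx < (w.length : Int) - 1 := by simp only [List.length_cons] at hlen; omega
      cases fuel with
      | zero => simp at hf
      | succ f =>
      have hf' : (c2 :: rest).length ≤ f := by simp only [List.length_cons] at hf ⊢; omega
      have hd' : w.drop (indx.toNat + 1) = c2 :: rest := by
        rw [← List.tail_drop, hd]; rfl
      have h1 : w[indx.toNat]? = some c1 := by rw [← List.head?_drop, hd]; rfl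
      have h2 : w[indx.toNat + 1]? = some c2 := by rw [← List.head?_drop, hd']; rfl
      have hg1 : PySem.List.pyGet? w indx = some c1 := by
        rw [show indx = ((indx.toNat : Nat) : Int) from (Int.toNat_of_nonneg h0).symm,
          PySem.List.pyGet?_natCast]
        exact h1
      have hg2 : PySem.List.pyGet? w (indx + 1) = some c2 := by
        rw [show indx + 1 = ((indx.toNat + 1 : Nat) : Int) from by omega,
          PySem.List.pyGet?_natCast]
        exact h2
      rw [pvALoop, if_pos hlt, hg1, hg2]
      simp only [pvLoopS]
      have h0' : (0 : Int) ≤ indx + 1 := by omega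
      have hdn : w.drop (indx + 1).toNat = c2 :: rest := by
        rw [show (indx + 1).toNat = indx.toNat + 1 from by omega]; exact hd'
      by_cases hb : c1 ∉ pvVowels ∧ c2 ∉ pvVowels
      · rw [if_pos hb, if_pos hb, ih w f (indx + 1) (count + 1) st h0' hdn hf']
      · rw [if_neg hb, if_neg hb]
        by_cases hc : count ≠ 0
        · rw [if_pos hc, if_pos hc, ih w f (indx + 1) 0 (st ++ [count]) h0' hdn hf']
        · rw [if_neg hc, if_neg hc, ih w f (indx + 1) count st h0' hdn hf']

lemma pvARes_eq (count : Int) (st : List Int) (h0 : 0 ≤ count) (hst : ∀ x ∈ st, 0 ≤ x) :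
    pvARes (count, st) = max (st.foldl max 0) count := by
  cases st with
  | nil =>
    simp [pvARes, PySem.List.max?_id_cons]
    omega
  | cons x tl =>
    have hx : max 0 x = x := by have := hst x (by simp); omega
    simp [pvARes, PySem.List.max?_id_cons, List.foldl_append, hx]

lemma pvMain : ∀ (rest : List Char) (c1 : Char) (count : Int) (st : List Int) (cur best : Int),
    0 ≤ cur → cur ≤ best →
    count = max (cur - 1) 0 →
    (c1 ∉ pvVowels ↔ 1 ≤ cur) →
    (∀ x ∈ st, 0 ≤ x) →
    max (st.foldl max 0) count = max 0 (best - 1) →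
    pvARes (pvLoopS (c1 :: rest) count st) = max 0 ((rest.foldl pvBStep (cur, best)).2 - 1) := by
  intro rest
  induction rest with
  | nil =>
    intro c1 count st cur best hc hcb hcount hiff hst hinv
    simp only [pvLoopS, List.foldl_nil]
    rw [pvARes_eq count st (by omega) hst, hinv]
  | cons c2 rest ih =>
    intro c1 count st cur best hc hcb hcount hiff hst hinv
    simp only [pvLoopS, List.foldl_cons]
    by_cases hb : c1 ∉ pvVowels ∧ c2 ∉ pvVowels
    · have hcur1 : 1 ≤ cur := hiff.mp hb.1
      have hstep : pvBStep (cur, best) c2 = (cur + 1, max best (cur + 1)) := by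
        simp [pvBStep, hb.2]
      rw [if_pos hb, hstep,
        ih c2 (count + 1) st (cur + 1) (max best (cur + 1)) (by omega) (by omega)
          (by omega) (by simp [hb.2]; omega) hst (by omega)]
    · rw [if_neg hb]
      by_cases hcnt : count ≠ 0
      · -- count ≠ 0 forces cur ≥ 2, hence c1 is a consonant and so c2 must be a vowel
        have hcur2 : 2 ≤ cur := by omega
        have hc1 : c1 ∉ pvVowels := hiff.mpr (by omega)
        have hc2 : ¬ c2 ∉ pvVowels := fun h => hb ⟨hc1, h⟩
        have hstep : pvBStep (cur, best) c2 = (0, max best 0) := by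
          simp [pvBStep] at hc2 ⊢
          simp [hc2]
        have hs0 : (st ++ [count]).foldl max 0 = max (st.foldl max 0) count := by
          simp [List.foldl_append]
        have hstapp : ∀ x ∈ st ++ [count], 0 ≤ x := by
          intro x hx
          rcases List.mem_append.mp hx with h | h
          · exact hst x h
          · simp at h; omega
        rw [if_pos hcnt, hstep,
          ih c2 0 (st ++ [count]) 0 (max best 0) (by omega) (by omega) (by omega)
            (by simp [hc2]) hstapp (by rw [hs0]; omega)]
      · rw [if_neg hcnt]
        have hcount0 : count = 0 := by omega
        have hcur01 : cur ≤ 1 := by omega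
        by_cases hc2 : c2 ∉ pvVowels
        · -- c2 consonant but not both: c1 is a vowel, so cur = 0 and the new run has length 1
          have hc1 : ¬ c1 ∉ pvVowels := fun h => hb ⟨h, hc2⟩
          have hcur0 : cur = 0 := by
            rcases (not_iff_not.mpr hiff).mp hc1 |> fun h => h with h
            omega
          have hstep : pvBStep (cur, best) c2 = (cur + 1, max best (cur + 1)) := by
            simp [pvBStep] at hc2 ⊢
            simp [hc2]
          rw [hstep,
            ih c2 count st (cur + 1) (max best (cur + 1)) (by omega) (by omega) (by omega)
              (by simp [hc2]; omega) hst (by omega)]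
        · have hstep : pvBStep (cur, best) c2 = (0, max best 0) := by
            simp [pvBStep] at hc2 ⊢
            simp [hc2]
          rw [hstep,
            ih c2 count st 0 (max best 0) (by omega) (by omega) (by omega)
              (by simp [hc2]) hst (by omega)]

lemma key_eq (s : String) : pvAKey s = pvBKey s := by
  have hbridge := pvALoop_eq_loopS (pvAStrip s.toList) (pvAStrip s.toList)
    (pvAStrip s.toList).length 0 0 [] (by norm_num) (by simp) (by simp)
  show pvARes (pvALoop (pvAStrip s.toList) (pvAStrip s.toList).length 0 [] 0)
      = max 0 (((pvBStrip s.toList).foldl pvBStep (0, 0)).2 - 1)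
  rw [show pvBStrip s.toList = pvAStrip s.toList from rfl, hbridge]
  cases hw : pvAStrip s.toList with
  | nil => decide
  | cons c1 t =>
    rw [List.foldl_cons]
    by_cases hc1 : c1 ∉ pvVowels
    · have hstep : pvBStep (0, 0) c1 = (1, 1) := by
        simp [pvBStep] at hc1 ⊢
        simp [hc1]
      rw [hstep]
      exact pvMain t c1 0 [] 1 1 (by omega) (by omega) (by omega) (by simp [hc1]) (by simp)
        (by norm_num)
    · have hstep : pvBStep (0, 0) c1 = (0, 0) := by
        simp [pvBStep] at hc1 ⊢
        simp [hc1]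
      rw [hstep]
      exact pvMain t c1 0 [] 0 0 (by omega) (by omega) (by omega) (by simp at hc1 ⊢; simp [hc1])
        (by simp) (by norm_num)

-- ===== VERDICT (by name: the statement is the Claim_ definition above) =====
theorem sort_by_consonant_count_spec : Claim_equal_sort_by_consonant_count := by
  intro lst _
  unfold Spec_sort_by_consonant_count sort_by_consonant_count sort_by_consonant_count_alt
  rw [show pvAKey = pvBKey from funext key_eq]
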